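-- pv_equiv track=rewrite | github.com/kurlez/mdsnap | scripts/md_to_cards.py | _chunk_without_manual_breaks
-- ===== SOURCE A (Python) =====
-- from typing import Dict, Iterable, Iterator, List, Optional, Sequence, Tuple
--
-- def _chunk_without_manual_breaks(
--     text: str,
--     chars_per_chunk: int,
-- ) -> List[str]:
--     paragraphs = [p.strip() for p in text.split("\n\n") if p.strip()]
--     if not paragraphs:
--         return []
--
--     chunks: List[str] = []
--     current = ""
--
--     for para in paragraphs:
--         tentative = f"{current}\n\n{para}" if current else para
--
--         if len(tentative) <= chars_per_chunk:
--             current = tentative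
--             continue
--
--         if current:
--             chunks.append(current)
--             current = ""
--
--         while len(para) > chars_per_chunk:
--             chunks.append(para[:chars_per_chunk])
--             para = para[chars_per_chunk:]
--         current = para
--
--     if current:
--         chunks.append(current)
--
--     return chunks
-- ===== SOURCE B (Python) =====
-- def _chunk_without_manual_breaks(text, chars_per_chunk):
--     # Stage 1: flatten the nonblank stripped paragraphs into budget-sized units
--     # by index arithmetic (every slice p[i:i+k] has length <= k).
--     paragraphs = [p.strip() for p in text.split("\n\n") if p.strip()]
--     units = [p[i:i + chars_per_chunk]
--              for p in paragraphs
--              for i in range(0, len(p), chars_per_chunk)]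
--     # Stage 2: greedy packing of the units; a unit always fits on its own,
--     # so the only question is whether it merges into the current chunk.
--     chunks = []
--     current = ""
--     for u in units:
--         if not current:
--             current = u
--         elif len(current) + 2 + len(u) <= chars_per_chunk:
--             current = current + "\n\n" + u
--         else:
--             chunks.append(current)
--             current = u
--     if current:
--         chunks.append(current)
--     return chunks
-- ===== Notes on version B (the rewrite author's own statement) =====
-- stated objective: alternative
-- what changed: B splits the work into two independent stages: index-arithmetic slicing (range(0, len(p), k)) flattens every stripped paragraph into budget-sized units in one comprehension, and a separate greedy packer with a three-way branch (empty current / merge fits / flush) folds the unit list; A instead decides fit, flush and hard-split inside one loop per paragraph with an inner while loop.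
import Mathlib
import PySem

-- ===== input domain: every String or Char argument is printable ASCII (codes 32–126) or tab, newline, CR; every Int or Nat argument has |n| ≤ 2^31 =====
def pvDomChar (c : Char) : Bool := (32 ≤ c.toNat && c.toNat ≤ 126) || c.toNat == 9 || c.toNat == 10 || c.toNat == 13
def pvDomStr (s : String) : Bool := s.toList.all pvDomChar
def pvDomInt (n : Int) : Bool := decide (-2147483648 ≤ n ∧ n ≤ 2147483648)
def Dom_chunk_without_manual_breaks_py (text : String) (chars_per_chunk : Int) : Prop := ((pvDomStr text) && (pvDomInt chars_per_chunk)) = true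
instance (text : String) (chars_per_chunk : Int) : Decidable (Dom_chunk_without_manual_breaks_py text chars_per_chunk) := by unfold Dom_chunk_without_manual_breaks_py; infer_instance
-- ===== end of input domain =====

-- B replaces A's interleaved fit/flush/hard-split loop by two stages: index arithmetic
-- (range with step) flattens paragraphs into budget-sized units, then a separate greedy
-- packer with a three-way branch folds the units (objective: alternative decomposition).


-- ===== PORT A =====
-- A's inner `while len(para) > chars_per_chunk` loop; fuel = para.length suffices whenever
-- 1 ≤ chars_per_chunk (each pass removes chars_per_chunk ≥ 1 characters).
def pvHardSplitA (c : Int) : Nat → List (List Char) → List Char → List (List Char) × List Char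
  | 0, chunks, para => (chunks, para)
  | f+1, chunks, para =>
    if c < (para.length : Int) then
      pvHardSplitA c f (chunks ++ [PySem.List.slice para none (some c)])
        (PySem.List.slice para (some c) none)
    else (chunks, para)

-- one iteration of A's `for para in paragraphs` loop on the state (chunks, current)
def pvStepA (c : Int) (st : List (List Char) × List Char) (para : List Char) :
    List (List Char) × List Char :=
  let tentative := if st.2 ≠ [] then st.2 ++ '\n' :: '\n' :: para else para
  if (tentative.length : Int) ≤ c then (st.1, tentative)
  else
    let chunks := if st.2 ≠ [] then st.1 ++ [st.2] else st.1
    pvHardSplitA c para.length chunks para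

def chunk_without_manual_breaks_py (text : String) (chars_per_chunk : Int) : List String :=
  let paragraphs := (((PySem.Str.split? text "\n\n").getD []).map
      (fun p => PySem.Chars.strip p.toList)).filter (fun p => decide (p ≠ []))
  if paragraphs = [] then []
  else
    let st := paragraphs.foldl (pvStepA chars_per_chunk) ([], [])
    (if st.2 ≠ [] then st.1 ++ [st.2] else st.1).map (fun cs => String.ofList cs)

-- ===== PORT B =====
-- one iteration of B's stage-2 loop: the three-way branch on `current`
def pvPackB (c : Int) (st : List (List Char) × List Char) (u : List Char) :
    List (List Char) × List Char :=
  if st.2 = [] then (st.1, u)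
  else if (st.2.length : Int) + 2 + (u.length : Int) ≤ c then
    (st.1, st.2 ++ '\n' :: '\n' :: u)
  else (st.1 ++ [st.2], u)

def chunk_without_manual_breaks_py_alt (text : String) (chars_per_chunk : Int) : List String :=
  let paragraphs := (((PySem.Str.split? text "\n\n").getD []).map
      (fun p => PySem.Chars.strip p.toList)).filter (fun p => decide (p ≠ []))
  -- [p[i:i+k] for p in paragraphs for i in range(0, len(p), k)]
  let units := paragraphs.flatMap (fun p =>
      (PySem.List.pyRange 0 (p.length : Int) chars_per_chunk).map
        (fun i => PySem.List.slice p (some i) (some (i + chars_per_chunk))))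
  let st := units.foldl (pvPackB chars_per_chunk) ([], [])
  (if st.2 ≠ [] then st.1 ++ [st.2] else st.1).map (fun cs => String.ofList cs)

-- ===== PRECONDITION & SPEC =====
-- A loops FOREVER (and B's range(0, len(p), step) raises ValueError for step 0) when
-- chars_per_chunk ≤ 0 and some paragraph of text is nonblank; Pre_ excludes exactly those
-- inputs and admits every input on which the Python A returns.
def Pre_chunk_without_manual_breaks_py (text : String) (chars_per_chunk : Int) : Prop :=
  1 ≤ chars_per_chunk ∨
    ∀ p ∈ (PySem.Str.split? text "\n\n").getD [], PySem.Chars.strip p.toList = []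
instance (text : String) (chars_per_chunk : Int) :
    Decidable (Pre_chunk_without_manual_breaks_py text chars_per_chunk) := by
  unfold Pre_chunk_without_manual_breaks_py; infer_instance

def pvWitness_chunk_without_manual_breaks_py : String × Int := ("hello world\n\nfoo bar", 8)

def Spec_chunk_without_manual_breaks_py (text : String) (chars_per_chunk : Int) (out : List String) : Prop := out = chunk_without_manual_breaks_py_alt text chars_per_chunk
instance (text : String) (chars_per_chunk : Int) (out : List String) : Decidable (Spec_chunk_without_manual_breaks_py text chars_per_chunk out) := by unfold Spec_chunk_without_manual_breaks_py; infer_instance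

-- ===== CLAIM (what is proved, stated in full; the proofs are below) =====
def Claim_equal_chunk_without_manual_breaks_py : Prop := ∀ (text : String) (chars_per_chunk : Int), Dom_chunk_without_manual_breaks_py text chars_per_chunk → Pre_chunk_without_manual_breaks_py text chars_per_chunk → Spec_chunk_without_manual_breaks_py text chars_per_chunk (chunk_without_manual_breaks_py text chars_per_chunk)

-- ===== LEMMAS AND PROOFS =====

-- the common "full slices then remainder" decomposition of one long paragraph
def pvChop (n : Nat) (p : List Char) : List (List Char) :=
  if _h : n < p.length ∧ 1 ≤ n then p.take n :: pvChop n (p.drop n) else [p]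
termination_by p.length
decreasing_by simp only [List.length_drop]; omega

theorem pvHardSplitA_stop (c : Int) (f : Nat) (ch : List (List Char)) (q : List Char)
    (h : ¬ c < (q.length : Int)) : pvHardSplitA c f ch q = (ch, q) := by
  cases f <;> simp [pvHardSplitA, h]

theorem pvHardSplitA_step (c : Int) (f : Nat) (ch : List (List Char)) (q : List Char)
    (h : c < (q.length : Int)) :
    pvHardSplitA c (f+1) ch q =
      pvHardSplitA c f (ch ++ [PySem.List.slice q none (some c)])
        (PySem.List.slice q (some c) none) := by
  simp [pvHardSplitA, h]

theorem pvHardSplitA_fuel (c : Int) (hc : 1 ≤ c) :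
    ∀ (f₁ f₂ : Nat) (ch : List (List Char)) (q : List Char),
      q.length ≤ f₁ → q.length ≤ f₂ →
      pvHardSplitA c f₁ ch q = pvHardSplitA c f₂ ch q := by
  intro f₁
  induction f₁ with
  | zero =>
    intro f₂ ch q h1 _
    have hq : q = [] := List.eq_nil_of_length_eq_zero (Nat.le_zero.mp h1)
    subst hq
    rw [pvHardSplitA_stop c 0 ch [] (by simp; omega),
        pvHardSplitA_stop c f₂ ch [] (by simp; omega)]
  | succ f ih =>
    intro f₂ ch q h1 h2
    by_cases hlt : c < (q.length : Int)
    · have hq : 1 ≤ q.length := by omega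
      obtain ⟨g, rfl⟩ : ∃ g, f₂ = g + 1 := ⟨f₂ - 1, by omega⟩
      rw [pvHardSplitA_step c f ch q hlt, pvHardSplitA_step c g ch q hlt]
      have hdrop : (PySem.List.slice q (some c)).length ≤ q.length - 1 := by
        rw [PySem.List.slice_from q (by omega : (0:Int) ≤ c)]
        simp only [List.length_drop]
        omega
      exact ih g _ _ (by omega) (by omega)
    · rw [pvHardSplitA_stop c (f+1) ch q hlt, pvHardSplitA_stop c f₂ ch q hlt]

-- a positive-step range is empty when it starts at or past its stop
theorem pvRange_pos_nil (a b c : Int) (hc : 0 < c) (h : b ≤ a) :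
    PySem.List.pyRange a b c = [] := by
  rw [PySem.List.pyRange_of_pos a b hc, if_neg (not_lt.mpr h)]
  simp

-- a positive-step range starting below its stop begins with its start
theorem pvRange_pos_cons (a b c : Int) (hc : 0 < c) (h : a < b) :
    PySem.List.pyRange a b c = a :: PySem.List.pyRange (a + c) b c := by
  rw [PySem.List.pyRange_of_pos a b hc, PySem.List.pyRange_of_pos (a+c) b hc]
  have hN : (if a < b then ((b - a + c - 1) / c).toNat else 0) =
      (if a + c < b then ((b - (a+c) + c - 1) / c).toNat else 0) + 1 := by
    rw [if_pos h]
    by_cases h2 : a + c < b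
    · rw [if_pos h2]
      have he : b - a + c - 1 = (b - (a+c) + c - 1) + 1 * c := by ring
      rw [he, Int.add_mul_ediv_right _ _ (by omega : c ≠ 0)]
      have hnn : 0 ≤ (b - (a+c) + c - 1) / c := Int.ediv_nonneg (by omega) (by omega)
      omega
    · rw [if_neg h2]
      have h1 : 1 ≤ (b - a + c - 1) / c := by
        rw [Int.le_ediv_iff_mul_le hc]; omega
      have h2' : (b - a + c - 1) / c < 2 := by
        rw [Int.ediv_lt_iff_lt_mul hc]; omega
      omega
  rw [hN, List.range_succ_eq_map]
  simp only [List.map_cons, List.map_map, Nat.cast_zero, mul_zero, add_zero, List.cons.injEq]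
  refine ⟨trivial, ?_⟩
  apply List.map_congr_left
  intro k _
  simp only [Function.comp_apply, Nat.succ_eq_add_one]
  push_cast
  ring

-- shifting a positive-step range
theorem pvRange_pos_shift (a b c d : Int) (hc : 0 < c) :
    PySem.List.pyRange (a + d) (b + d) c = (PySem.List.pyRange a b c).map (· + d) := by
  rw [PySem.List.pyRange_of_pos (a+d) (b+d) hc, PySem.List.pyRange_of_pos a b hc]
  have : b + d - (a + d) = b - a := by ring
  rw [this, List.map_map]
  have hco : a + d < b + d ↔ a < b := by omega
  simp only [hco]
  apply List.map_congr_left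
  intro k _
  simp only [Function.comp_apply]
  ring

-- B's stage 1 on one paragraph is exactly the chop decomposition
theorem pvSlices_eq_chop (c : Int) (hc : 1 ≤ c) :
    ∀ p : List Char, p ≠ [] →
      (PySem.List.pyRange 0 (p.length : Int) c).map
        (fun i => PySem.List.slice p (some i) (some (i + c))) = pvChop c.toNat p := by
  intro p
  induction p using (measure List.length).wf.induction with
  | _ p ih =>
  intro hp
  have hlen : 0 < p.length := List.length_pos_iff.mpr hp
  rw [pvRange_pos_cons 0 (p.length : Int) c (by omega) (by exact_mod_cast hlen),
      List.map_cons, zero_add, pvChop]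
  by_cases hn : c.toNat < p.length ∧ 1 ≤ c.toNat
  · rw [dif_pos hn]
    have hhead : PySem.List.slice p (some 0) (some c) = p.take c.toNat := by
      rw [PySem.List.slice_zero_start, PySem.List.slice_to p (by omega : (0:Int) ≤ c)]
    rw [hhead]
    refine congrArg _ ?_
    have hshift : PySem.List.pyRange c (p.length : Int) c =
        (PySem.List.pyRange 0 ((p.length : Int) - c) c).map (· + c) := by
      have := pvRange_pos_shift 0 ((p.length : Int) - c) c c (by omega)
      simpa using this
    rw [hshift, List.map_map]
    have hdne : p.drop c.toNat ≠ [] := by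
      simp only [ne_eq, List.drop_eq_nil_iff]; omega
    have hdlt : (p.drop c.toNat).length < p.length := by
      simp only [List.length_drop]; omega
    have hdl : ((p.drop c.toNat).length : Int) = (p.length : Int) - c := by
      simp only [List.length_drop]; omega
    rw [← ih (p.drop c.toNat) hdlt hdne, hdl]
    apply List.map_congr_left
    intro i hi
    have hi0 : 0 ≤ i := ((PySem.List.mem_pyRange_iff_of_pos (by omega)) i).mp hi |>.1
    simp only [Function.comp_apply]
    rw [PySem.List.slice_toNat p (by omega) (by omega),
        PySem.List.slice_toNat (p.drop c.toNat) (by omega) (by omega),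
        List.drop_drop]
    have h1 : (i + c).toNat = i.toNat + c.toNat := by omega
    rw [h1]
    have e1 : (i + c + c).toNat - (i.toNat + c.toNat) = i.toNat + c.toNat - i.toNat := by omega
    have e2 : c.toNat + i.toNat = i.toNat + c.toNat := by omega
    rw [e1, e2]
  · rw [dif_neg hn]
    have hle : (p.length : Int) ≤ c := by omega
    rw [pvRange_pos_nil c (p.length : Int) c (by omega) hle]
    simp only [List.map_nil]
    rw [PySem.List.slice_zero_start, PySem.List.slice_to p (by omega : (0:Int) ≤ c),
        List.take_of_length_le (by omega : p.length ≤ c.toNat)]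

-- B's packer step written in A's tentative/flush shape (used only in the proofs)
def pvStep' (c : Int) (st : List (List Char) × List Char) (u : List Char) :
    List (List Char) × List Char :=
  let tentative := if st.2 ≠ [] then st.2 ++ '\n' :: '\n' :: u else u
  if (tentative.length : Int) ≤ c then (st.1, tentative)
  else ((if st.2 ≠ [] then st.1 ++ [st.2] else st.1), u)

theorem pvPackB_eq_step' (c : Int) (st : List (List Char) × List Char) (u : List Char) :
    pvPackB c st u = pvStep' c st u := by
  by_cases hcur : st.2 = []
  · simp only [pvPackB, pvStep', hcur]
    split <;> simp_all
  · have hlen : ((st.2 ++ '\n' :: '\n' :: u).length : Int) =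
        (st.2.length : Int) + 2 + (u.length : Int) := by
      simp only [List.length_append, List.length_cons]; push_cast; omega
    simp only [pvPackB, pvStep', hcur, ne_eq, not_false_eq_true, if_true, if_false, hlen]

theorem pvStep'_chop (c : Int) (hc : 1 ≤ c) :
    ∀ (p : List Char), p ≠ [] → ∀ (st : List (List Char) × List Char),
      List.foldl (pvStep' c) st (pvChop c.toNat p) = pvStepA c st p := by
  intro p
  induction p using (measure List.length).wf.induction with
  | _ p ih =>
  intro hp st
  have hlen : 1 ≤ p.length := List.length_pos_iff.mpr hp
  rw [pvChop]
  by_cases hlt : c < (p.length : Int)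
  · have hn : c.toNat < p.length ∧ 1 ≤ c.toNat := by omega
    rw [dif_pos hn]
    have htake : (p.take c.toNat).length = c.toNat := by
      simp only [List.length_take]; omega
    have htne : p.take c.toNat ≠ [] := by
      intro h; have := congrArg List.length h; rw [htake] at this; simp at this; omega
    have hdne : p.drop c.toNat ≠ [] := by
      simp only [ne_eq, List.drop_eq_nil_iff]; omega
    have hdlt : (p.drop c.toNat).length < p.length := by
      simp only [List.length_drop]; omega
    -- first unit: the state becomes (flushed chunks, p.take n) whether or not current is empty
    have hfirst : pvStep' c st (p.take c.toNat) =
        ((if st.2 ≠ [] then st.1 ++ [st.2] else st.1), p.take c.toNat) := by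
      by_cases hcur : st.2 = []
      · simp only [pvStep', hcur]
        split <;> simp_all
      · have hten : (if st.2 ≠ [] then st.2 ++ '\n' :: '\n' :: p.take c.toNat
            else p.take c.toNat) = st.2 ++ '\n' :: '\n' :: p.take c.toNat := by
          simp [hcur]
        simp only [pvStep', hten]
        rw [if_neg]
        · simp only [List.length_append, List.length_cons, htake]
          push_cast
          omega
    rw [List.foldl_cons, hfirst, ih (p.drop c.toNat) hdlt hdne]
    -- both sides are now the hard split of the tail with the same flushed chunks
    have hstep2 : pvStepA c ((if st.2 ≠ [] then st.1 ++ [st.2] else st.1), p.take c.toNat)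
        (p.drop c.toNat) =
        pvHardSplitA c (p.drop c.toNat).length
          ((if st.2 ≠ [] then st.1 ++ [st.2] else st.1) ++ [p.take c.toNat])
          (p.drop c.toNat) := by
      simp only [pvStepA, ne_eq, htne, not_false_eq_true, if_true]
      rw [if_neg]
      simp only [List.length_append, List.length_cons, htake, List.length_drop]
      push_cast
      omega
    have hstepA : pvStepA c st p =
        pvHardSplitA c (p.drop c.toNat).length
          ((if st.2 ≠ [] then st.1 ++ [st.2] else st.1) ++ [p.take c.toNat])
          (p.drop c.toNat) := by
      simp only [pvStepA]
      rw [if_neg]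
      · have hg : p.length = (p.length - 1) + 1 := by omega
        rw [hg, pvHardSplitA_step c (p.length - 1) _ p hlt,
            PySem.List.slice_to p (by omega : (0:Int) ≤ c),
            PySem.List.slice_from p (by omega : (0:Int) ≤ c)]
        exact pvHardSplitA_fuel c hc (p.length - 1) _ _ _
          (by simp only [List.length_drop]; omega) (le_refl _)
      · by_cases hcur : st.2 = [] <;>
          simp only [hcur, ne_eq, not_true_eq_false, if_false, not_false_eq_true, if_true,
            List.length_append, List.length_cons] <;>
          push_cast <;> omega
    rw [hstep2, hstepA]
  · have hn : ¬ (c.toNat < p.length ∧ 1 ≤ c.toNat) := by omega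
    rw [dif_neg hn]
    simp only [List.foldl_cons, List.foldl_nil, pvStep', pvStepA,
      pvHardSplitA_stop c p.length _ p hlt]

theorem pvUnits_eq (c : Int) (hc : 1 ≤ c) :
    ∀ (P : List (List Char)), (∀ p ∈ P, p ≠ []) →
      P.flatMap (fun p =>
        (PySem.List.pyRange 0 (p.length : Int) c).map
          (fun i => PySem.List.slice p (some i) (some (i + c)))) =
      P.flatMap (pvChop c.toNat) := by
  intro P
  induction P with
  | nil => intro _; rfl
  | cons p Q ih =>
    intro hmem
    simp only [List.flatMap_cons]
    rw [pvSlices_eq_chop c hc p (hmem p (by simp)), ih (fun q hq => hmem q (by simp [hq]))]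

theorem pvPack_flat (c : Int) (hc : 1 ≤ c) :
    ∀ (P : List (List Char)), (∀ p ∈ P, p ≠ []) → ∀ st,
      List.foldl (pvStep' c) st (P.flatMap (pvChop c.toNat)) =
        List.foldl (pvStepA c) st P := by
  intro P
  induction P with
  | nil => intro _ st; simp
  | cons p P ih =>
    intro hmem st
    simp only [List.flatMap_cons, List.foldl_append, List.foldl_cons]
    rw [pvStep'_chop c hc p (hmem p (by simp)) st]
    exact ih (fun q hq => hmem q (by simp [hq])) _

-- ===== VERDICT (by name: the statement is the Claim_ definition above) =====
theorem chunk_without_manual_breaks_py_spec : Claim_equal_chunk_without_manual_breaks_py := by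
  intro text c _ hpre
  unfold Spec_chunk_without_manual_breaks_py
  unfold chunk_without_manual_breaks_py chunk_without_manual_breaks_py_alt
  dsimp only
  set P := ((((PySem.Str.split? text "\n\n").getD []).map
      (fun p => PySem.Chars.strip p.toList)).filter (fun p => decide (p ≠ []))) with hP
  have hmem : ∀ p ∈ P, p ≠ [] := by
    intro p hp
    have := (List.mem_filter.mp hp).2
    simpa using this
  by_cases hc : 1 ≤ c
  · -- normal case: B's unit list is the chop decomposition of the paragraphs,
    -- and the packer fold over it equals A's fold
    rw [pvUnits_eq c hc P hmem]
    have hfold : ∀ (us : List (List Char)) st,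
        List.foldl (pvPackB c) st us = List.foldl (pvStep' c) st us := by
      intro us
      induction us with
      | nil => intro st; rfl
      | cons u us ihu => intro st; rw [List.foldl_cons, List.foldl_cons, pvPackB_eq_step', ihu]
    rw [hfold, pvPack_flat c hc P hmem]
    by_cases hnil : P = []
    · rw [if_pos hnil, hnil]
      simp
    · rw [if_neg hnil]
  · -- chars_per_chunk ≤ 0: Pre_ says every paragraph is blank, so P = [] and both return []
    have hblank : ∀ p ∈ (PySem.Str.split? text "\n\n").getD [],
        PySem.Chars.strip p.toList = [] := by
      cases hpre with
      | inl h => exact absurd h hc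
      | inr h => exact h
    have hPnil : P = [] := by
      rw [hP, List.filter_eq_nil_iff]
      intro p hp
      simp only [List.mem_map] at hp
      obtain ⟨s, hs, rfl⟩ := hp
      simp [hblank s hs]
    rw [if_pos hPnil, hPnil]
    simp
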